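-- pv_equiv track=rewrite | github.com/comp-cogneuro-lang/fastlex | fastlex.py | uniqueness_points
-- ===== SOURCE A (Python) =====
-- from typing import Any, Dict, List, Optional, Set, Tuple
--
-- def _lcp_len(a: str, b: str) -> int:
--     """Length of longest common prefix of two strings."""
--     n = min(len(a), len(b))
--     i = 0
--     while i < n and a[i] == b[i]:
--         i += 1
--     return i
--
-- def uniqueness_points(strings: List[str]) -> List[int]:
--     """
--     Compute uniqueness point (UP) for each string in `strings`.
--
--     UP is the first 1-based position where the prefix becomes unique.
--     If not unique by the final position (prefix of a longer word OR duplicates),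
--     UP = len(string) + 1.
--
--     Notes:
--       - Works for orthographic forms (characters) directly.
--       - For phonology, pass the single-character encoded token string (phones-as-chars)
--         so UP is measured in tokens, not raw characters.
--     """
--     n = len(strings)
--     order = sorted(range(n), key=lambda i: strings[i])
--     ups: List[int] = [0] * n
--
--     for pos, idx in enumerate(order):
--         w = strings[idx]
--         if not w:
--             ups[idx] = 1
--             continue
--
--         lcp_prev = _lcp_len(w, strings[order[pos - 1]]) if pos > 0 else 0
--         lcp_next = _lcp_len(w, strings[order[pos + 1]]) if (pos + 1) < n else 0
--
--         m = lcp_prev if lcp_prev > lcp_next else lcp_next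
--         L = len(w)
--
--         ups[idx] = (L + 1) if m >= L else (m + 1)
--
--     return ups
-- ===== SOURCE B (Python) =====
-- from typing import List
--
-- def uniqueness_points(strings: List[str]) -> List[int]:
--     counts = {}
--     for w in strings:
--         for d in range(1, len(w) + 1):
--             p = w[:d]
--             counts[p] = counts.get(p, 0) + 1
--     ups: List[int] = []
--     for w in strings:
--         up = len(w) + 1
--         for d in range(1, len(w) + 1):
--             if counts.get(w[:d], 0) == 1:
--                 up = d
--                 break
--         ups.append(up)
--     return ups
-- ===== Notes on version B (the rewrite author's own statement) =====
-- stated objective: alternative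
-- what changed: Replaces sort-neighbours-and-scatter (sort indices by string, take max LCP with the two sorted neighbours) by a prefix-count hash map: count every prefix of every string once, then each string's uniqueness point is the first depth whose prefix count is 1, else len+1.
import Mathlib
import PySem

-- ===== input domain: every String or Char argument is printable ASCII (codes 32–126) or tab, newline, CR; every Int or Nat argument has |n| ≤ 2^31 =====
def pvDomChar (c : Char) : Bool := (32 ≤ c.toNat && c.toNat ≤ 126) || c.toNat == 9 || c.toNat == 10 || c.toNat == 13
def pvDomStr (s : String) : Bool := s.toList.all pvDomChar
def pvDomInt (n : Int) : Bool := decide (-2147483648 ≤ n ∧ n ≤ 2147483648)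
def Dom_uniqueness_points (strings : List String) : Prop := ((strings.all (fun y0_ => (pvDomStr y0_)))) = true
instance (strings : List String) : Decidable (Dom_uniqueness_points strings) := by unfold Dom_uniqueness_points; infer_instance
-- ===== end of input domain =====

-- B replaces A's sort-neighbours-and-scatter by a prefix-count dictionary (count every prefix once,
-- then each string's uniqueness point is the first depth whose prefix count is 1, else len+1);
-- alternative algorithm, equal return value on all inputs.

-- ===== PORT A =====
-- while loop of _lcp_len: i advances while i < n and a[i] == b[i]
def lcpLoopA (a b : List Char) (n i : Nat) : Nat :=
  if i < n then
    if a[i]? = b[i]? then lcpLoopA a b n (i + 1) else i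
  else i
termination_by n - i

def _lcp_len (a b : String) : Int :=
  (lcpLoopA a.toList b.toList (min a.toList.length b.toList.length) 0 : Nat)

def uniqueness_points (strings : List String) : List Int :=
  let n := strings.length
  let order := PySem.List.sorted (PySem.List.pyRange 0 (n : Int) 1)
      (fun i => PySem.List.pyGetD strings i "")
  let ups : List Int := List.replicate n 0
  (PySem.List.enumerate order 0).foldl (fun ups pi =>
    let pos := pi.1
    let idx := pi.2
    let w := PySem.List.pyGetD strings idx ""
    if w.toList = [] then
      PySem.List.pySetD ups idx 1
    else
      let lcp_prev : Int := if 0 < pos then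
          _lcp_len w (PySem.List.pyGetD strings (PySem.List.pyGetD order (pos - 1) 0) "") else 0
      let lcp_next : Int := if pos + 1 < (n : Int) then
          _lcp_len w (PySem.List.pyGetD strings (PySem.List.pyGetD order (pos + 1) 0) "") else 0
      let m := if lcp_prev > lcp_next then lcp_prev else lcp_next
      let L : Int := PySem.Str.len w
      PySem.List.pySetD ups idx (if m ≥ L then L + 1 else m + 1)) ups

-- ===== PORT B =====
-- for d in range(1, len(w)+1): first d with counts[w[:d]] == 1, else len(w)+1 (for-loop with break)
def findUP (counts : PySem.Dict String Int) (w : String) : List Int → Int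
  | [] => PySem.Str.len w + 1
  | d :: ds =>
      if counts.getD (PySem.Str.slice w none (some d)) 0 = 1 then d
      else findUP counts w ds

def uniqueness_points_alt (strings : List String) : List Int :=
  let counts := strings.foldl (fun counts w =>
      (PySem.List.pyRange 1 (PySem.Str.len w + 1) 1).foldl (fun counts d =>
        counts.modify (PySem.Str.slice w none (some d)) 0 (fun c => c + 1)) counts)
    PySem.Dict.empty
  strings.map (fun w => findUP counts w (PySem.List.pyRange 1 (PySem.Str.len w + 1) 1))

-- ===== PRECONDITION & SPEC =====
def Spec_uniqueness_points (strings : List String) (out : List Int) : Prop := out = uniqueness_points_alt strings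
instance (strings : List String) (out : List Int) : Decidable (Spec_uniqueness_points strings out) := by unfold Spec_uniqueness_points; infer_instance

-- ===== CLAIM (what is proved, stated in full; the proofs are below) =====
def Claim_equal_uniqueness_points : Prop := ∀ (strings : List String), Dom_uniqueness_points strings → Spec_uniqueness_points strings (uniqueness_points strings)

-- ===== LEMMAS AND PROOFS =====

-- structural longest-common-prefix length (proof-side reference value)
def lcp : List Char → List Char → Nat
  | x :: xs, y :: ys => if x = y then lcp xs ys + 1 else 0
  | _, _ => 0

@[simp] lemma lcp_nil_left (b : List Char) : lcp [] b = 0 := by cases b <;> rfl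
@[simp] lemma lcp_nil_right (a : List Char) : lcp a [] = 0 := by cases a <;> rfl
@[simp] lemma lcp_cons (x y : Char) (xs ys : List Char) :
    lcp (x :: xs) (y :: ys) = if x = y then lcp xs ys + 1 else 0 := rfl

lemma lcp_comm (a b : List Char) : lcp a b = lcp b a := by
  induction a generalizing b with
  | nil => simp
  | cons x xs ih => cases b with
    | nil => simp
    | cons y ys =>
      by_cases h : x = y
      · subst h; simp [ih]
      · simp [h, Ne.symm h]

lemma le_lcp_iff (a b : List Char) (d : Nat) :
    d ≤ lcp a b ↔ d ≤ a.length ∧ d ≤ b.length ∧ a.take d = b.take d := by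
  induction a generalizing b d with
  | nil => cases d <;> simp
  | cons x xs ih =>
    cases b with
    | nil => cases d <;> simp
    | cons y ys =>
      cases d with
      | zero => simp
      | succ d =>
        by_cases h : x = y
        · subst h
          simpa using ih ys d
        · simp only [lcp_cons, if_neg h, Nat.le_zero, List.take_succ_cons]
          constructor
          · intro hd; omega
          · rintro ⟨-, -, hc⟩; exact absurd (List.cons.injEq .. ▸ hc).1 h

lemma lcp_refl (a : List Char) : lcp a a = a.length := by
  induction a with
  | nil => simp
  | cons x xs ih => simp [ih]

-- bridging the linear order on List Char to head/tail form
lemma cons_le_cons_iff' (x y : Char) (l m : List Char) : x :: l ≤ y :: m ↔ x < y ∨ (x = y ∧ l ≤ m) := by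
  constructor
  · intro h
    rcases lt_or_eq_of_le h with h | h
    · have hlex : List.Lex (· < ·) (x :: l) (y :: m) := h
      cases hlex with
      | cons h' => exact Or.inr ⟨rfl, le_of_lt (show l < m from h')⟩
      | rel h' => exact Or.inl h'
    · injection h with h1 h2; exact Or.inr ⟨h1, le_of_eq h2⟩
  · rintro (h | ⟨rfl, h⟩)
    · exact le_of_lt (show (x::l) < (y::m) from List.Lex.rel h)
    · exact List.cons_le_cons x h
lemma not_cons_le_nil (x : Char) (l : List Char) : ¬ (x :: l ≤ ([] : List Char)) := by
  intro h
  rcases lt_or_eq_of_le h with h | h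
  · exact (List.not_lt_nil _) h
  · simp at h

-- middle string shares any common prefix of the outer two
lemma take_middle : ∀ (d : Nat) (a b c : List Char), a ≤ b → b ≤ c →
    a.take d = c.take d → d ≤ a.length → d ≤ c.length →
    (b.take d = a.take d ∧ d ≤ b.length) := by
  intro d
  induction d with
  | zero => intro a b c _ _ _ _ _; simp
  | succ d ih =>
    rintro (_ | ⟨x, a⟩) b c h1 h2 ht ha hc
    · simp at ha
    rcases c with _ | ⟨z, c⟩
    · simp at hc
    rcases b with _ | ⟨y, b⟩
    · exact absurd h1 (not_cons_le_nil _ _)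
    simp only [List.take_succ_cons, List.cons.injEq] at ht
    obtain ⟨hxz, ht'⟩ := ht
    subst hxz
    rcases (cons_le_cons_iff' _ _ _ _).mp h1 with hxy | ⟨hxy, hab⟩
    · rcases (cons_le_cons_iff' _ _ _ _).mp h2 with hyx | ⟨hyx, hbc⟩
      · exact absurd (lt_trans hxy hyx) (lt_irrefl _)
      · subst hyx; exact absurd hxy (lt_irrefl _)
    · subst hxy
      rcases (cons_le_cons_iff' _ _ _ _).mp h2 with hyx | ⟨-, hbc⟩
      · exact absurd hyx (lt_irrefl _)
      simp only [List.length_cons, Nat.succ_le_succ_iff] at ha hc ⊢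
      obtain ⟨h1', h2'⟩ := ih a b c hab hbc ht' ha hc
      simp [List.take_succ_cons, h1', h2']

lemma lcp_mono (a b c : List Char) (h1 : a ≤ b) (h2 : b ≤ c) :
    lcp a c ≤ lcp b c ∧ lcp a c ≤ lcp a b := by
  have hd := (le_lcp_iff a c (lcp a c)).mp le_rfl
  obtain ⟨ha, hc, ht⟩ := hd
  obtain ⟨hbt, hb⟩ := take_middle (lcp a c) a b c h1 h2 ht ha hc
  constructor
  · exact (le_lcp_iff b c _).mpr ⟨hb, hc, hbt.trans ht⟩
  · exact (le_lcp_iff a b _).mpr ⟨ha, hb, hbt.symm⟩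

-- the while loop of A computes lcp
lemma lcpLoopA_drop (a b : List Char) : ∀ i, lcpLoopA a b (min a.length b.length) i = i + lcp (a.drop i) (b.drop i) := by
  intro i
  induction h : min a.length b.length - i using Nat.strong_induction_on generalizing i with
  | _ n ih =>
  rw [lcpLoopA]
  by_cases hi : i < min a.length b.length
  · have hia : i < a.length := lt_of_lt_of_le hi (min_le_left _ _)
    have hib : i < b.length := lt_of_lt_of_le hi (min_le_right _ _)
    rw [List.drop_eq_getElem_cons hia, List.drop_eq_getElem_cons hib]
    rw [List.getElem?_eq_getElem hia, List.getElem?_eq_getElem hib]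
    by_cases he : a[i] = b[i]
    · rw [if_pos hi, if_pos (by rw [he]), ih (min a.length b.length - (i+1)) (by omega) (i+1) rfl]
      rw [lcp_cons, if_pos he]
      omega
    · rw [if_pos hi, if_neg (by simpa using he), lcp_cons, if_neg he]
      omega
    
  · rw [if_neg hi]
    have : a.length ≤ i ∨ b.length ≤ i := by omega
    rcases this with h | h
    · rw [List.drop_of_length_le h]; simp
    · rw [List.drop_of_length_le h]; simp

lemma lcp_len_eq (a b : String) : _lcp_len a b = (lcp a.toList b.toList : Int) := by
  rw [_lcp_len, lcpLoopA_drop]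
  simp

-- A-side abbreviations (definitionally the port's let-bound values)
def keyA (strings : List String) : Int → String := fun i => PySem.List.pyGetD strings i ""

def ordA (strings : List String) : List Int :=
  PySem.List.sorted (PySem.List.pyRange 0 (strings.length : Int) 1) (keyA strings)

def gA (strings : List String) (pos idx : Int) : Int :=
  let w := PySem.List.pyGetD strings idx ""
  if w.toList = [] then 1
  else
    let lcp_prev : Int := if 0 < pos then
        _lcp_len w (PySem.List.pyGetD strings (PySem.List.pyGetD (ordA strings) (pos - 1) 0) "") else 0
    let lcp_next : Int := if pos + 1 < (strings.length : Int) then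
        _lcp_len w (PySem.List.pyGetD strings (PySem.List.pyGetD (ordA strings) (pos + 1) 0) "") else 0
    let m := if lcp_prev > lcp_next then lcp_prev else lcp_next
    let L : Int := PySem.Str.len w
    if m ≥ L then L + 1 else m + 1

lemma A_eq_scatter (strings : List String) :
    uniqueness_points strings =
      (PySem.List.enumerate (ordA strings) 0).foldl
        (fun ups pi => PySem.List.pySetD ups pi.2 (gA strings pi.1 pi.2))
        (List.replicate strings.length 0) := by
  rw [uniqueness_points]
  show (PySem.List.enumerate (ordA strings) 0).foldl _ _ = _
  congr 1
  funext ups pi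
  simp only [gA, ordA]
  by_cases h : (PySem.List.pyGetD strings pi.2 "").toList = []
  · rw [if_pos h, if_pos h]
  · rw [if_neg h, if_neg h]
    rfl

-- scatter lemmas
lemma scatter_len (g : Int → Int → Int) : ∀ (ord : List Int) (s : Int) (ups : List Int),
    ((PySem.List.enumerate ord s).foldl (fun u pi => PySem.List.pySetD u pi.2 (g pi.1 pi.2)) ups).length = ups.length := by
  intro ord
  induction ord with
  | nil => intro s ups; simp [PySem.List.enumerate_nil]
  | cons x t ih =>
    intro s ups
    rw [PySem.List.enumerate_cons]
    simp only [List.foldl_cons]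
    rw [ih]
    exact PySem.List.length_pySetD ..

lemma scatter_untouched (g : Int → Int → Int) : ∀ (ord : List Int) (s : Int) (ups : List Int) (k : Nat),
    (∀ x ∈ ord, 0 ≤ x) → (∀ x ∈ ord, x ≠ (k : Int)) →
    ((PySem.List.enumerate ord s).foldl (fun u pi => PySem.List.pySetD u pi.2 (g pi.1 pi.2)) ups)[k]? = ups[k]? := by
  intro ord
  induction ord with
  | nil => intro s ups k _ _; simp [PySem.List.enumerate_nil]
  | cons x t ih =>
    intro s ups k hnn hne
    rw [PySem.List.enumerate_cons]
    simp only [List.foldl_cons]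
    rw [ih (s+1) _ k (fun y hy => hnn y (List.mem_cons_of_mem _ hy)) (fun y hy => hne y (List.mem_cons_of_mem _ hy))]
    rw [PySem.List.pySetD_of_nonneg _ _ (hnn x List.mem_cons_self)]
    rw [List.getElem?_set_ne]
    intro hc
    apply hne x List.mem_cons_self
    rw [← hc, Int.toNat_of_nonneg (hnn x List.mem_cons_self)]

lemma scatter_get (g : Int → Int → Int) : ∀ (ord : List Int) (s : Int) (ups : List Int) (k p : Nat)
    (hp : p < ord.length), ord.Nodup → (∀ x ∈ ord, 0 ≤ x) → ord[p] = (k : Int) → k < ups.length →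
    ((PySem.List.enumerate ord s).foldl (fun u pi => PySem.List.pySetD u pi.2 (g pi.1 pi.2)) ups)[k]? = some (g (s + p) (k : Int)) := by
  intro ord
  induction ord with
  | nil => intro s ups k p hp; simp at hp
  | cons x t ih =>
    intro s ups k p hp hnd hnn he hk
    rw [PySem.List.enumerate_cons]
    simp only [List.foldl_cons]
    cases p with
    | zero =>
      simp only [List.getElem_cons_zero] at he
      subst he
      rw [scatter_untouched g t (s+1) _ k (fun y hy => hnn y (List.mem_cons_of_mem _ hy))
        (fun y hy hc => (List.nodup_cons.mp hnd).1 (hc ▸ hy))]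
      rw [PySem.List.pySetD_natCast]
      rw [List.getElem?_set_self (by exact hk)]
      simp
    | succ p =>
      have hp' : p < t.length := by simpa using hp
      have he' : t[p]'hp' = (k : Int) := by simpa using he
      have hlen : k < (PySem.List.pySetD ups x (g s x)).length := by
        rw [PySem.List.length_pySetD]; exact hk
      rw [ih (s+1) _ k p hp' (List.nodup_cons.mp hnd).2
        (fun y hy => hnn y (List.mem_cons_of_mem _ hy)) he' hlen]
      congr 2
      push_cast
      ring

-- B-side abbreviations
def stepB (counts : PySem.Dict String Int) (w : String) : PySem.Dict String Int :=
  (PySem.List.pyRange 1 (PySem.Str.len w + 1) 1).foldl (fun counts d =>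
    counts.modify (PySem.Str.slice w none (some d)) 0 (fun c => c + 1)) counts

def buildC (strings : List String) : PySem.Dict String Int := strings.foldl stepB PySem.Dict.empty

def prefList (w : String) : List String :=
  (PySem.List.pyRange 1 (PySem.Str.len w + 1) 1).map (fun d => PySem.Str.slice w none (some d))

lemma B_eq (strings : List String) :
    uniqueness_points_alt strings =
      strings.map (fun w => findUP (buildC strings) w (PySem.List.pyRange 1 (PySem.Str.len w + 1) 1)) := rfl

lemma stepB_getD (dct : PySem.Dict String Int) (w : String) (p : String) :
    (stepB dct w).getD p 0 = dct.getD p 0 + ((prefList w).count p : Int) := by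
  rw [stepB, show (List.foldl (fun (counts : PySem.Dict String Int) d => counts.modify (PySem.Str.slice w none (some d)) 0 fun c => c + 1) dct
      (PySem.List.pyRange 1 (PySem.Str.len w + 1) 1)) = (List.foldl (fun (counts : PySem.Dict String Int) q => counts.modify q 0 fun c => c + 1) dct
      (prefList w)) from (List.foldl_map (f := fun d => PySem.Str.slice w none (some d)) (g := fun (counts : PySem.Dict String Int) q => counts.modify q 0 fun c => c + 1) (l := PySem.List.pyRange 1 (PySem.Str.len w + 1) 1) (init := dct)).symm]
  exact PySem.Dict.getD_foldl_modify_add_one (prefList w) dct p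

lemma build_getD (p : String) : ∀ (ss : List String) (dct : PySem.Dict String Int),
    (ss.foldl stepB dct).getD p 0 = dct.getD p 0 + ((ss.map (fun w => ((prefList w).count p : Int))).sum) := by
  intro ss
  induction ss with
  | nil => intro dct; simp
  | cons w t ih =>
    intro dct
    simp only [List.foldl_cons, List.map_cons, List.sum_cons]
    rw [ih, stepB_getD]
    ring

-- toList of the Python slice w[:d]
lemma toList_slice_take (w : String) (d : Nat) :
    (PySem.Str.slice w none (some (d : Int))).toList = w.toList.take d := by
  rw [PySem.Str.toList_slice, PySem.Chars.slice_eq_listSlice, PySem.List.slice_to_natCast]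

lemma slice_eq_iff (w v : String) (d e : Nat) (hd : d ≤ w.toList.length) (he : e ≤ v.toList.length) :
    PySem.Str.slice v none (some (e : Int)) = PySem.Str.slice w none (some (d : Int)) ↔
      (e = d ∧ v.toList.take d = w.toList.take d) := by
  constructor
  · intro h
    have ht : v.toList.take e = w.toList.take d := by
      rw [← toList_slice_take, ← toList_slice_take, h]
    have hlen : e = d := by
      have := congrArg List.length ht
      simp only [List.length_take] at this
      omega
    exact ⟨hlen, hlen ▸ ht⟩
  · rintro ⟨rfl, ht⟩
    rw [← String.toList_inj, toList_slice_take, toList_slice_take, ht]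

lemma nodup_prefList (v : String) : (prefList v).Nodup := by
  apply List.Nodup.map_on _ (by simpa using PySem.List.nodup_pyRange_one 1 (PySem.Str.len v + 1))
  intro x hx y hy hxy
  rw [PySem.List.mem_pyRange_one] at hx hy
  rw [PySem.Str.len_eq] at hx hy
  obtain ⟨x', rfl⟩ : ∃ x' : Nat, x = (x' : Int) := ⟨x.toNat, (Int.toNat_of_nonneg (by omega)).symm⟩
  obtain ⟨y', rfl⟩ : ∃ y' : Nat, y = (y' : Int) := ⟨y.toNat, (Int.toNat_of_nonneg (by omega)).symm⟩
  have hx' : x' ≤ v.toList.length := by omega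
  have hy' : y' ≤ v.toList.length := by omega
  have := (slice_eq_iff v v y' x' (by omega) (by omega)).mp hxy
  omega

lemma countPref (w v : String) (d : Nat) (h1 : 1 ≤ d) (h2 : d ≤ w.toList.length) :
    (prefList v).count (PySem.Str.slice w none (some (d : Int))) =
      if d ≤ lcp w.toList v.toList then 1 else 0 := by
  by_cases hc : d ≤ lcp w.toList v.toList
  · rw [if_pos hc]
    rw [le_lcp_iff] at hc
    obtain ⟨hdw, hdv, ht⟩ := hc
    apply List.count_eq_one_of_mem (nodup_prefList v)
    rw [prefList, List.mem_map]
    refine ⟨(d : Int), ?_, ?_⟩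
    · rw [PySem.List.mem_pyRange_one, PySem.Str.len_eq]; omega
    · exact (slice_eq_iff w v d d h2 hdv).mpr ⟨rfl, ht.symm⟩
  · rw [if_neg hc]
    rw [List.count_eq_zero]
    intro hmem
    rw [prefList, List.mem_map] at hmem
    obtain ⟨e, he, heq⟩ := hmem
    rw [PySem.List.mem_pyRange_one, PySem.Str.len_eq] at he
    obtain ⟨e', rfl⟩ : ∃ e' : Nat, e = (e' : Int) := ⟨e.toNat, (Int.toNat_of_nonneg (by omega)).symm⟩
    have he' : e' ≤ v.toList.length := by omega
    obtain ⟨rfl, ht⟩ := (slice_eq_iff w v d e' h2 he').mp heq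
    exact hc ((le_lcp_iff _ _ _).mpr ⟨h2, he', ht.symm⟩)

lemma countP_one_iff {α : Type} (pred : α → Bool) : ∀ (l : List α) (i : Nat) (hi : i < l.length),
    pred l[i] = true →
    (l.countP pred = 1 ↔ ∀ j, (hj : j < l.length) → j ≠ i → pred l[j] = false) := by
  intro l
  induction l with
  | nil => intro i hi; simp at hi
  | cons x t ih =>
    intro i hi hp
    cases i with
    | zero =>
      simp only [List.getElem_cons_zero] at hp
      rw [List.countP_cons, if_pos hp]
      constructor
      · intro h j hj hj0
        have ht : t.countP pred = 0 := by omega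
        rw [List.countP_eq_zero] at ht
        obtain ⟨j', rfl⟩ : ∃ j', j = j' + 1 := ⟨j - 1, by omega⟩
        simp only [List.getElem_cons_succ]
        exact Bool.eq_false_iff.mpr (fun hc => (ht _ (List.getElem_mem (by simpa using hj))) hc)
      · intro h
        have ht : t.countP pred = 0 := by
          rw [List.countP_eq_zero]
          intro a ha
          obtain ⟨j', hj', rfl⟩ := List.mem_iff_getElem.mp ha
          have := h (j' + 1) (by simpa using hj') (by omega)
          simpa using this
        omega
    | succ i =>
      have hi' : i < t.length := by simpa using hi
      have hp' : pred (t[i]'hi') = true := by simpa using hp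
      rw [List.countP_cons]
      by_cases hx : pred x = true
      · rw [if_pos hx]
        constructor
        · intro h
          have ht : t.countP pred = 0 := by omega
          rw [List.countP_eq_zero] at ht
          exact absurd hp' (ht _ (List.getElem_mem hi'))
        · intro h
          exact absurd (h 0 (by simp) (by omega)) (by simp [hx])
      · rw [if_neg hx]
        simp only [add_zero]
        rw [ih i hi' hp']
        constructor
        · intro h j hj hji
          cases j with
          | zero => simpa using Bool.eq_false_iff.mpr hx
          | succ j => exact (by simpa using h j (by simpa using hj) (by omega))
        · intro h j hj hji
          have := h (j + 1) (by simpa using hj) (by omega)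
          simpa using this

lemma sum_ind {α : Type} (pred : α → Bool) : ∀ (l : List α),
    (l.map (fun v => ((if pred v then 1 else 0 : Nat) : Int))).sum = (l.countP pred : Int) := by
  intro l
  induction l with
  | nil => simp
  | cons x t ih =>
    simp only [List.map_cons, List.sum_cons, List.countP_cons, ih]
    by_cases h : pred x = true <;> simp [h]
    omega

lemma counts_getD (strings : List String) (i : Nat) (hi : i < strings.length) (d : Nat)
    (h1 : 1 ≤ d) (h2 : d ≤ (strings[i]).toList.length) :
    (buildC strings).getD (PySem.Str.slice strings[i] none (some (d : Int))) 0 =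
      (strings.countP (fun v => decide (d ≤ lcp (strings[i]).toList v.toList)) : Int) := by
  rw [buildC, build_getD, PySem.Dict.getD_empty, zero_add]
  have hmap : (strings.map (fun w => (((prefList w).count (PySem.Str.slice strings[i] none (some (d : Int)))) : Int)))
      = strings.map (fun v => ((if (fun v => decide (d ≤ lcp (strings[i]).toList v.toList)) v then 1 else 0 : Nat) : Int)) := by
    apply List.map_congr_left
    intro v _
    rw [countPref _ _ _ h1 h2]
    by_cases h : d ≤ lcp (strings[i]).toList v.toList <;> simp [h]
  rw [hmap, sum_ind]

lemma findUP_aux (counts : PySem.Dict String Int) (w : String) (m : Nat)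
    (h : ∀ d : Nat, 1 ≤ d → d ≤ w.toList.length →
      ((counts.getD (PySem.Str.slice w none (some (d : Int))) 0 = 1) ↔ m < d)) :
    ∀ (fuel a : Nat), w.toList.length + 1 - a ≤ fuel → 1 ≤ a → a ≤ m + 1 → a ≤ w.toList.length + 1 →
    findUP counts w (PySem.List.pyRange (a : Int) ((w.toList.length : Int) + 1) 1) =
      if w.toList.length ≤ m then (w.toList.length : Int) + 1 else (m : Int) + 1 := by
  intro fuel
  induction fuel with
  | zero =>
    intro a hf h1 hm hL
    have ha : a = w.toList.length + 1 := by omega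
    subst ha
    rw [PySem.List.pyRange_one_eq_nil (by omega)]
    rw [findUP, if_pos (by omega), PySem.Str.len_eq]
  | succ fuel ih =>
    intro a hf h1 hm hL
    by_cases ha : a ≤ w.toList.length
    · rw [PySem.List.pyRange_one_cons (by omega)]
      rw [findUP]
      by_cases hhit : m < a
      · rw [if_pos ((h a h1 ha).mpr hhit)]
        rw [if_neg (by omega)]
        have : a = m + 1 := by omega
        simp [this]
      · rw [if_neg (by rw [h a h1 ha]; exact hhit)]
        have : ((a : Int) + 1) = ((a + 1 : Nat) : Int) := by push_cast; ring
        rw [this]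
        exact ih (a + 1) (by omega) (by omega) (by omega) (by omega)
    · have ha' : a = w.toList.length + 1 := by omega
      subst ha'
      rw [PySem.List.pyRange_one_eq_nil (by omega)]
      rw [findUP, if_pos (by omega), PySem.Str.len_eq]

lemma findUP_spec (counts : PySem.Dict String Int) (w : String) (m : Nat)
    (h : ∀ d : Nat, 1 ≤ d → d ≤ w.toList.length →
      ((counts.getD (PySem.Str.slice w none (some (d : Int))) 0 = 1) ↔ m < d)) :
    findUP counts w (PySem.List.pyRange 1 ((PySem.Str.len w) + 1) 1) =
      if w.toList.length ≤ m then (w.toList.length : Int) + 1 else (m : Int) + 1 := by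
  have := findUP_aux counts w m h (w.toList.length + 1) 1 (by omega) le_rfl (by omega) (by omega)
  rw [PySem.Str.len_eq]
  exact_mod_cast this

-- indexing shorthand (Python strings[j] for an in-range j)
def sI (strings : List String) (j : Nat) : String := strings.getD j ""

lemma keyA_nat (strings : List String) (j : Nat) : keyA strings (j : Int) = sI strings j := by
  rw [keyA, PySem.List.pyGetD_natCast, sI]

lemma ordA_len (strings : List String) : (ordA strings).length = strings.length := by
  rw [ordA, PySem.List.length_sorted, PySem.List.length_pyRange_one]
  omega

lemma ordA_bounds (strings : List String) : ∀ x ∈ ordA strings, 0 ≤ x ∧ x < strings.length := by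
  intro x hx
  rw [ordA, PySem.List.mem_sorted, PySem.List.mem_pyRange_one] at hx
  exact hx

lemma ordA_nodup (strings : List String) : (ordA strings).Nodup :=
  ((PySem.List.sorted_perm _ _ _).nodup_iff).mpr (PySem.List.nodup_pyRange_one _ _)

lemma mem_ordA (strings : List String) (k : Nat) (hk : k < strings.length) :
    (k : Int) ∈ ordA strings := by
  rw [ordA, PySem.List.mem_sorted, PySem.List.mem_pyRange_one]
  omega

lemma ordA_key_mono (strings : List String) (p q : Nat) (hpq : p ≤ q)
    (hq : q < (ordA strings).length) :
    keyA strings ((ordA strings)[p]'(lt_of_le_of_lt hpq hq)) ≤ keyA strings ((ordA strings)[q]) := by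
  exact PySem.List.key_sorted_getElem_mono _ _ hpq hq

-- LCP monotone along the string order, pivot on the right resp. left
lemma lcp_between_prev (u v w : String) (h1 : u ≤ v) (h2 : v ≤ w) :
    lcp w.toList u.toList ≤ lcp w.toList v.toList := by
  rw [String.le_iff_toList_le] at h1 h2
  have := (lcp_mono u.toList v.toList w.toList h1 h2).1
  calc lcp w.toList u.toList = lcp u.toList w.toList := lcp_comm ..
    _ ≤ lcp v.toList w.toList := this
    _ = lcp w.toList v.toList := lcp_comm ..

lemma lcp_between_next (w v u : String) (h1 : w ≤ v) (h2 : v ≤ u) :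
    lcp w.toList u.toList ≤ lcp w.toList v.toList := by
  rw [String.le_iff_toList_le] at h1 h2
  exact (lcp_mono w.toList v.toList u.toList h1 h2).2

lemma neighborVal (strings : List String) (q : Nat) (hq : q < (ordA strings).length) :
    ∃ j : Nat, j < strings.length ∧ (ordA strings)[q] = (j : Int) ∧
      PySem.List.pyGetD strings ((ordA strings)[q]) "" = sI strings j := by
  obtain ⟨h0, hn⟩ := ordA_bounds strings _ (List.getElem_mem hq)
  refine ⟨((ordA strings)[q]).toNat, by omega, (Int.toNat_of_nonneg h0).symm, ?_⟩
  rw [show (ordA strings)[q] = (((ordA strings)[q]).toNat : Int) from (Int.toNat_of_nonneg h0).symm,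
    PySem.List.pyGetD_natCast, sI]
  congr 1

-- position of an index j ≠ i in the sorted order
lemma pos_of_ne (strings : List String) (i p j : Nat) (hp : p < (ordA strings).length)
    (ho : (ordA strings)[p] = (i : Int)) (hj : j < strings.length) (hij : j ≠ i) :
    ∃ q : Nat, ∃ (hq : q < (ordA strings).length), (ordA strings)[q] = (j : Int) ∧ q ≠ p := by
  obtain ⟨q, hq, he⟩ := List.mem_iff_getElem.mp (mem_ordA strings j hj)
  refine ⟨q, hq, he, ?_⟩
  intro hc
  subst hc
  rw [ho] at he
  exact hij (by exact_mod_cast he.symm)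

-- A's neighbour maximum in closed form, with its two defining properties
lemma gA_closed (strings : List String) (i p : Nat) (hi : i < strings.length)
    (hp : p < (ordA strings).length) (ho : (ordA strings)[p] = (i : Int))
    (hw : (sI strings i).toList ≠ []) :
    ∃ mN : Nat,
      gA strings (p : Int) (i : Int) =
        (if (sI strings i).toList.length ≤ mN then ((sI strings i).toList.length : Int) + 1 else (mN : Int) + 1) ∧
      (∀ j : Nat, j < strings.length → j ≠ i →
        lcp (sI strings i).toList (sI strings j).toList ≤ mN) ∧
      (mN = 0 ∨ ∃ j : Nat, j < strings.length ∧ j ≠ i ∧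
        mN ≤ lcp (sI strings i).toList (sI strings j).toList) := by
  have hkey : PySem.List.pyGetD strings (i : Int) "" = sI strings i := by
    rw [PySem.List.pyGetD_natCast, sI]
  have hLn : (ordA strings).length = strings.length := ordA_len strings
  -- the two neighbour lcp values (0 where the guard is false)
  have hprev : ∀ (h0 : 0 < p), ∃ j1 : Nat, j1 < strings.length ∧ j1 ≠ i ∧
      (PySem.List.pyGetD strings (PySem.List.pyGetD (ordA strings) ((p : Int) - 1) 0) "") = sI strings j1 ∧
      sI strings j1 ≤ sI strings i ∧
      (∀ q : Nat, q < p → ∀ (hq : q < (ordA strings).length), keyA strings ((ordA strings)[q]) ≤ sI strings j1) := by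
    intro h0
    have hp1 : p - 1 < (ordA strings).length := by omega
    obtain ⟨j1, hj1n, hj1e, hj1v⟩ := neighborVal strings (p-1) hp1
    have hgd : PySem.List.pyGetD (ordA strings) ((p : Int) - 1) 0 = (ordA strings)[p-1] := by
      rw [show ((p : Int) - 1) = ((p - 1 : Nat) : Int) by omega, PySem.List.pyGetD_natCast,
        List.getD_eq_getElem _ _ hp1]
    have hne : j1 ≠ i := by
      intro hc
      have : (ordA strings)[p-1] = (ordA strings)[p] := by rw [hj1e, ho, hc]
      have := ((ordA_nodup strings).getElem_inj_iff).mp this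
      omega
    have hle : sI strings j1 ≤ sI strings i := by
      have := ordA_key_mono strings (p-1) p (by omega) hp
      rwa [hj1e, ho, keyA_nat, keyA_nat] at this
    refine ⟨j1, hj1n, hne, by rw [hgd]; exact hj1v, hle, ?_⟩
    intro q hqp hq
    have := ordA_key_mono strings q (p-1) (by omega) hp1
    rwa [hj1e, keyA_nat] at this
  have hnext : ∀ (h1 : p + 1 < strings.length), ∃ j2 : Nat, j2 < strings.length ∧ j2 ≠ i ∧
      (PySem.List.pyGetD strings (PySem.List.pyGetD (ordA strings) ((p : Int) + 1) 0) "") = sI strings j2 ∧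
      sI strings i ≤ sI strings j2 ∧
      (∀ q : Nat, p < q → ∀ (hq : q < (ordA strings).length), sI strings j2 ≤ keyA strings ((ordA strings)[q])) := by
    intro h1
    have hp1 : p + 1 < (ordA strings).length := by omega
    obtain ⟨j2, hj2n, hj2e, hj2v⟩ := neighborVal strings (p+1) hp1
    have hgd : PySem.List.pyGetD (ordA strings) ((p : Int) + 1) 0 = (ordA strings)[p+1] := by
      rw [show ((p : Int) + 1) = ((p + 1 : Nat) : Int) by omega, PySem.List.pyGetD_natCast,
        List.getD_eq_getElem _ _ hp1]
    have hne : j2 ≠ i := by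
      intro hc
      have : (ordA strings)[p+1] = (ordA strings)[p] := by rw [hj2e, ho, hc]
      have := ((ordA_nodup strings).getElem_inj_iff).mp this
      omega
    have hle : sI strings i ≤ sI strings j2 := by
      have := ordA_key_mono strings p (p+1) (by omega) hp1
      rwa [hj2e, ho, keyA_nat, keyA_nat] at this
    refine ⟨j2, hj2n, hne, by rw [hgd]; exact hj2v, hle, ?_⟩
    intro q hqp hq
    have := ordA_key_mono strings (p+1) q hqp hq
    rwa [hj2e, keyA_nat] at this
  by_cases h0 : 0 < p <;> by_cases h1 : p + 1 < strings.length
  · -- both neighbours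
    obtain ⟨j1, hj1n, hj1i, hj1v, hj1le, hj1max⟩ := hprev h0
    obtain ⟨j2, hj2n, hj2i, hj2v, hj2le, hj2max⟩ := hnext h1
    refine ⟨max (lcp (sI strings i).toList (sI strings j1).toList)
              (lcp (sI strings i).toList (sI strings j2).toList), ?_, ?_, ?_⟩
    · simp only [gA]
      rw [hkey, if_neg hw,
        if_pos (show (0:Int) < (p:Int) by exact_mod_cast h0),
        if_pos (show (p:Int) + 1 < (strings.length:Int) by exact_mod_cast h1),
        hj1v, hj2v, lcp_len_eq, lcp_len_eq, PySem.Str.len_eq]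
      split_ifs <;> omega
    · intro j hjn hji
      obtain ⟨q, hq, hqe, hqp⟩ := pos_of_ne strings i p j hp ho hjn hji
      rcases Nat.lt_or_ge q p with hlt | hge
      · have := hj1max q hlt hq
        rw [hqe, keyA_nat] at this
        exact le_trans (lcp_between_prev _ _ _ this hj1le) (le_max_left _ _)
      · have hgt : p < q := by omega
        have := hj2max q hgt hq
        rw [hqe, keyA_nat] at this
        exact le_trans (lcp_between_next _ _ _ hj2le this) (le_max_right _ _)
    · rcases max_choice (lcp (sI strings i).toList (sI strings j1).toList)
        (lcp (sI strings i).toList (sI strings j2).toList) with hm | hm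
      · exact Or.inr ⟨j1, hj1n, hj1i, le_of_eq hm⟩
      · exact Or.inr ⟨j2, hj2n, hj2i, le_of_eq hm⟩
  · -- only the previous neighbour
    obtain ⟨j1, hj1n, hj1i, hj1v, hj1le, hj1max⟩ := hprev h0
    refine ⟨lcp (sI strings i).toList (sI strings j1).toList, ?_, ?_, ?_⟩
    · simp only [gA]
      rw [hkey, if_neg hw,
        if_pos (show (0:Int) < (p:Int) by exact_mod_cast h0),
        if_neg (show ¬((p:Int) + 1 < (strings.length:Int)) by exact_mod_cast h1),
        hj1v, lcp_len_eq, PySem.Str.len_eq]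
      split_ifs <;> omega
    · intro j hjn hji
      obtain ⟨q, hq, hqe, hqp⟩ := pos_of_ne strings i p j hp ho hjn hji
      have hlt : q < p := by rw [ordA_len] at hq; omega
      have := hj1max q hlt hq
      rw [hqe, keyA_nat] at this
      exact lcp_between_prev _ _ _ this hj1le
    · exact Or.inr ⟨j1, hj1n, hj1i, le_rfl⟩
  · -- only the next neighbour
    obtain ⟨j2, hj2n, hj2i, hj2v, hj2le, hj2max⟩ := hnext h1
    refine ⟨lcp (sI strings i).toList (sI strings j2).toList, ?_, ?_, ?_⟩
    · simp only [gA]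
      rw [hkey, if_neg hw,
        if_neg (show ¬((0:Int) < (p:Int)) by exact_mod_cast h0),
        if_pos (show (p:Int) + 1 < (strings.length:Int) by exact_mod_cast h1),
        hj2v, lcp_len_eq, PySem.Str.len_eq]
      split_ifs <;> omega
    · intro j hjn hji
      obtain ⟨q, hq, hqe, hqp⟩ := pos_of_ne strings i p j hp ho hjn hji
      have hgt : p < q := by omega
      have := hj2max q hgt hq
      rw [hqe, keyA_nat] at this
      exact lcp_between_next _ _ _ hj2le this
    · exact Or.inr ⟨j2, hj2n, hj2i, le_rfl⟩
  · -- no neighbour at all (single string)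
    refine ⟨0, ?_, ?_, Or.inl rfl⟩
    · simp only [gA]
      rw [hkey, if_neg hw,
        if_neg (show ¬((0:Int) < (p:Int)) by exact_mod_cast h0),
        if_neg (show ¬((p:Int) + 1 < (strings.length:Int)) by exact_mod_cast h1),
        PySem.Str.len_eq]
      have hL : 1 ≤ (sI strings i).toList.length := by
        cases h : (sI strings i).toList with
        | nil => exact absurd h hw
        | cons a t => simp
      split_ifs <;> omega
    · intro j hjn hji
      rw [ordA_len] at hp
      omega

lemma per_index (strings : List String) (i p : Nat) (hi : i < strings.length)
    (hp : p < (ordA strings).length) (ho : (ordA strings)[p] = (i : Int)) :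
    gA strings (p : Int) (i : Int) =
      findUP (buildC strings) (sI strings i)
        (PySem.List.pyRange 1 (PySem.Str.len (sI strings i) + 1) 1) := by
  have hsi : sI strings i = strings[i] := List.getD_eq_getElem _ _ hi
  by_cases hw : (sI strings i).toList = []
  · simp only [gA]
    rw [PySem.List.pyGetD_natCast, show strings.getD i "" = sI strings i from rfl, if_pos hw]
    have hr : PySem.List.pyRange 1 (PySem.Str.len (sI strings i) + 1) 1 = [] := by
      rw [PySem.Str.len_eq, hw]
      exact PySem.List.pyRange_one_eq_nil (by norm_num)
    rw [hr, findUP, PySem.Str.len_eq, hw]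
    norm_num
  · obtain ⟨mN, hclosed, hub, hattain⟩ := gA_closed strings i p hi hp ho hw
    rw [hclosed, ← findUP_spec (buildC strings) (sI strings i) mN]
    intro d hd1 hd2
    rw [hsi] at hd2 ⊢
    rw [counts_getD strings i hi d hd1 hd2]
    have hcast : ∀ c : Nat, ((c : Int) = 1 ↔ c = 1) := by intro c; omega
    rw [hcast]
    rw [countP_one_iff _ strings i hi (by simp only [decide_eq_true_eq, lcp_refl]; exact hd2)]
    constructor
    · intro h
      by_contra hc
      rw [not_lt] at hc
      have hdm : d ≤ mN := by omega
      rcases hattain with hz | ⟨j, hjn, hji, hja⟩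
      · omega
      · have := h j hjn hji
        rw [← hsi] at this
        rw [show (strings[j]'hjn) = sI strings j from (List.getD_eq_getElem _ _ hjn).symm] at this
        simp at this
        omega
    · intro h j hjn hji
      have := hub j hjn hji
      rw [← hsi, show (strings[j]'hjn) = sI strings j from (List.getD_eq_getElem _ _ hjn).symm]
      simp
      omega

-- ===== VERDICT (by name: the statement is the Claim_ definition above) =====
theorem uniqueness_points_spec : Claim_equal_uniqueness_points := by
  intro strings _
  show uniqueness_points strings = uniqueness_points_alt strings
  rw [A_eq_scatter, B_eq]
  apply List.ext_getElem?
  intro k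
  by_cases hk : k < strings.length
  · obtain ⟨p, hp, hpe⟩ := List.mem_iff_getElem.mp (mem_ordA strings k hk)
    rw [scatter_get _ (ordA strings) 0 _ k p hp (ordA_nodup strings)
      (fun x hx => (ordA_bounds strings x hx).1) hpe (by simpa using hk)]
    rw [List.getElem?_map, List.getElem?_eq_getElem hk]
    simp only [Option.map_some]
    rw [zero_add, per_index strings k p hk hp hpe,
      show sI strings k = strings[k] from List.getD_eq_getElem _ _ hk]
  · rw [List.getElem?_eq_none, List.getElem?_eq_none]
    · rw [List.length_map]; omega
    · rw [scatter_len, List.length_replicate]; omega
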